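-- pv_equiv track=rewrite | github.com/hash02/aml-detection-engine | engine/engine_v11_blockchain.py | dfs_find_cycle
-- ===== SOURCE A (Python) =====
-- def dfs_find_cycle(graph, start, current, path, max_depth, visited):
--     if len(path) > max_depth:
--         return None
--     for neighbor in graph.get(current, []):
--         if neighbor == start and len(path) >= 2:
--             return path + [neighbor]
--         if neighbor not in visited:
--             visited.add(neighbor)
--             result = dfs_find_cycle(graph, start, neighbor, path + [neighbor], max_depth, visited)
--             if result:
--                 return result
--             visited.discard(neighbor)
--     return None
-- ===== SOURCE B (Python) =====
-- def dfs_find_cycle(graph, start, current, path, max_depth, visited):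
--     if len(path) > max_depth:
--         return None
--     # iterative DFS: explicit stack of frames (node, its path, next neighbor index, whether this frame added its node to visited)
--     stack = [(current, path, 0, False)]
--     while stack:
--         node, p, i, added = stack[-1]
--         nbrs = graph.get(node, [])
--         if i < len(nbrs):
--             stack[-1] = (node, p, i + 1, added)
--             nb = nbrs[i]
--             if nb == start and len(p) >= 2:
--                 return p + [nb]
--             if nb not in visited:
--                 if len(p) + 1 <= max_depth:
--                     visited.add(nb)
--                     stack.append((nb, p + [nb], 0, True))
--         else:
--             stack.pop()
--             if added:
--                 visited.discard(node)
--     return None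
-- ===== Notes on version B (the rewrite author's own statement) =====
-- stated objective: alternative
-- what changed: A's recursive DFS (recursion per node, for-loop over neighbours, visited add/discard around the recursive call) is replaced by an iterative DFS: a while loop over an explicit stack of frames (node, path, next-neighbour index, added flag), with the depth cutoff enforced at push time and the visited discard performed when a frame is popped.
import Mathlib
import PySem

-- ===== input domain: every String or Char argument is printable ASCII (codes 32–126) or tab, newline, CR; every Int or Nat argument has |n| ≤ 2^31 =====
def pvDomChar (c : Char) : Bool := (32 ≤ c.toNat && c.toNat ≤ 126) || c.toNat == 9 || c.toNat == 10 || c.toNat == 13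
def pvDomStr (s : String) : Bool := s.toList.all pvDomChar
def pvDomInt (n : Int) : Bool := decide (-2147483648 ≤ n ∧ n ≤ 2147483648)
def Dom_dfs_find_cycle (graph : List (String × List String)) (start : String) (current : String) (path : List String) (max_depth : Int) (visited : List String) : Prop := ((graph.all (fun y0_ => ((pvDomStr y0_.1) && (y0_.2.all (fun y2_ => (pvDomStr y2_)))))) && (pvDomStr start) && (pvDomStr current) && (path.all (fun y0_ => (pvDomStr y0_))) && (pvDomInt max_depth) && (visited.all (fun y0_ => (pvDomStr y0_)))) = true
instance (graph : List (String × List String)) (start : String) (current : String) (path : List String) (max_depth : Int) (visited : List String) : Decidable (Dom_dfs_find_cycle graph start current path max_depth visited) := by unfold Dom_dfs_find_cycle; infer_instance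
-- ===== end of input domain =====

-- B replaces A's recursive DFS by an iterative DFS over an explicit stack of frames (alternative
-- decomposition, same cost). Both A and B mutate the caller's `visited` set identically (net: nodes of a
-- found cycle stay added, everything else is restored); the theorems below are about the return value.

-- ===== PORT A =====
-- A's recursion is fueled: fuel = (max_depth + 1 - len(path)).toNat, which is 0 exactly when the
-- `len(path) > max_depth` guard returns None, so the fuel-0 branch returns exactly what A returns there.
-- `dfsA` is the recursive function (returning (result, visited), since A mutates `visited`), `loopA` its
-- `for neighbor in graph.get(current, [])` loop.  A's `if result:` test is ported as a match on `some`: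
-- the only lists A ever returns are `path + [neighbor]`, which are nonempty, so truthiness = isSome.
mutual
def dfsA (graph : List (String × List String)) (start : String) (md : Int)
    (fuel : Nat) (current : String) (path : List String) (visited : PySem.Set String) :
    Option (List String) × PySem.Set String :=
  match fuel with
  | 0 => (none, visited)
  | Nat.succ f =>
    if (path.length : Int) > md then (none, visited)
    else loopA graph start md f path (PySem.Dict.getD (PySem.Dict.mk graph) current []) visited
termination_by (fuel, 0)

def loopA (graph : List (String × List String)) (start : String) (md : Int)
    (fuel : Nat) (path : List String) (ns : List String) (visited : PySem.Set String) :
    Option (List String) × PySem.Set String :=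
  match ns with
  | [] => (none, visited)
  | n :: rest =>
    if n == start && decide (2 ≤ path.length) then (some (path ++ [n]), visited)
    else if !(PySem.Set.contains visited n) then
      match dfsA graph start md fuel n (path ++ [n]) (PySem.Set.add visited n) with
      | (some r, v') => (some r, v')
      | (none, v') => loopA graph start md fuel path rest (PySem.Set.discard v' n)
    else loopA graph start md fuel path rest visited
termination_by (fuel, ns.length + 1)
end

def dfs_find_cycle (graph : List (String × List String)) (start : String) (current : String) (path : List String) (max_depth : Int) (visited : List String) : Option (List String) :=
  (dfsA graph start max_depth ((max_depth + 1 - path.length).toNat) current path (PySem.Set.ofList visited)).1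

-- ===== PORT B =====
-- termination measure for B's while-loop: each stack frame (node, p, i, added) weighs
-- (remaining neighbours of node) * (total edge count + 1) ^ (depth budget of p) + 1
def pvEdges (graph : List (String × List String)) : Nat :=
  (graph.map (fun kv => kv.2.length)).sum

def pvPhi (graph : List (String × List String)) (md : Int) (fr : String × List String × Nat × Bool) : Nat :=
  ((PySem.Dict.getD (PySem.Dict.mk graph) fr.1 []).length - fr.2.2.1) * (pvEdges graph + 1) ^ ((md + 1 - fr.2.1.length).toNat) + 1

def pvM (graph : List (String × List String)) (md : Int) (stack : List (String × List String × Nat × Bool)) : Nat :=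
  (stack.map (pvPhi graph md)).sum

lemma pvGetD_length_le (graph : List (String × List String)) (node : String) :
    (PySem.Dict.getD (PySem.Dict.mk graph) node []).length ≤ pvEdges graph := by
  induction graph with
  | nil => simp [PySem.Dict.getD, PySem.Dict.get?, pvEdges]
  | cons kv rest ih =>
    simp only [PySem.Dict.getD, PySem.Dict.get?, List.find?, pvEdges,
      List.map_cons, List.sum_cons] at *
    by_cases h : kv.1 == node
    · simp [h]
    · simp only [h, Bool.false_eq_true] at *
      omega

lemma pvM_pop (graph : List (String × List String)) (md : Int)
    (fr : String × List String × Nat × Bool) (rest : List (String × List String × Nat × Bool)) :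
    pvM graph md rest < pvM graph md (fr :: rest) := by
  simp only [pvM, List.map_cons, List.sum_cons, pvPhi]
  omega

lemma pvM_skip (graph : List (String × List String)) (md : Int)
    (node : String) (p : List String) (i : Nat) (added : Bool)
    (rest : List (String × List String × Nat × Bool))
    (h : i < (PySem.Dict.getD (PySem.Dict.mk graph) node []).length) :
    pvM graph md ((node, p, i + 1, added) :: rest) < pvM graph md ((node, p, i, added) :: rest) := by
  simp only [pvM, List.map_cons, List.sum_cons, pvPhi]
  have he : 1 ≤ (pvEdges graph + 1) ^ ((md + 1 - (p.length : Int)).toNat) :=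
    Nat.one_le_pow _ _ (by omega)
  have hL : (PySem.Dict.getD (PySem.Dict.mk graph) node []).length - i
      = ((PySem.Dict.getD (PySem.Dict.mk graph) node []).length - (i + 1)) + 1 := by omega
  rw [hL, Nat.add_mul, Nat.one_mul]
  omega

lemma pvM_push (graph : List (String × List String)) (md : Int)
    (node : String) (p : List String) (i : Nat) (added : Bool) (nb : String)
    (rest : List (String × List String × Nat × Bool))
    (h : i < (PySem.Dict.getD (PySem.Dict.mk graph) node []).length)
    (hd : (p.length : Int) + 1 ≤ md) :
    pvM graph md ((nb, p ++ [nb], 0, true) :: (node, p, i + 1, added) :: rest)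
      < pvM graph md ((node, p, i, added) :: rest) := by
  simp only [pvM, List.map_cons, List.sum_cons, pvPhi, List.length_append, List.length_cons,
    List.length_nil, Nat.sub_zero]
  set E := pvEdges graph + 1 with hE
  have hE2 : 2 ≤ E := by
    have := pvGetD_length_le graph node
    omega
  have hR : (PySem.Dict.getD (PySem.Dict.mk graph) nb []).length ≤ E - 1 := by
    have := pvGetD_length_le graph nb
    omega
  have hDD : (md + 1 - (p.length : Int)).toNat = (md + 1 - ((p.length + 0 + 1 : Nat) : Int)).toNat + 1 := by
    push_cast
    omega
  have hD1 : 1 ≤ (md + 1 - ((p.length + 0 + 1 : Nat) : Int)).toNat := by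
    push_cast
    omega
  set D' := (md + 1 - ((p.length + 0 + 1 : Nat) : Int)).toNat with hD'
  have hx : E ≤ E ^ D' := by
    calc E = E ^ 1 := (pow_one E).symm
    _ ≤ E ^ D' := Nat.pow_le_pow_right (by omega) hD1
  rw [hDD, pow_succ]
  have hL : (PySem.Dict.getD (PySem.Dict.mk graph) node []).length - i
      = ((PySem.Dict.getD (PySem.Dict.mk graph) node []).length - (i + 1)) + 1 := by omega
  rw [hL, Nat.add_mul, Nat.one_mul]
  have key : (PySem.Dict.getD (PySem.Dict.mk graph) nb []).length * E ^ D' + 2 ≤ E ^ D' * E := by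
    have h1 : (PySem.Dict.getD (PySem.Dict.mk graph) nb []).length * E ^ D' ≤ (E - 1) * E ^ D' :=
      Nat.mul_le_mul_right _ hR
    have h2 : (E - 1) * E ^ D' + E ^ D' = E ^ D' * E := by
      have : E - 1 + 1 = E := by omega
      calc (E - 1) * E ^ D' + E ^ D' = (E - 1 + 1) * E ^ D' := by ring
      _ = E * E ^ D' := by rw [this]
      _ = E ^ D' * E := by ring
    omega
  omega

-- B: the while-loop over `stack`, one tail-recursive step per iteration; frames are
-- (node, path, next neighbour index, added-to-visited flag).  Terminates by the measure pvM.
def runB (graph : List (String × List String)) (start : String) (md : Int)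
    (stack : List (String × List String × Nat × Bool)) (visited : PySem.Set String) :
    Option (List String) :=
  match stack with
  | [] => none
  | (node, p, i, added) :: rest =>
    if h : i < (PySem.Dict.getD (PySem.Dict.mk graph) node []).length then
      let nb := (PySem.Dict.getD (PySem.Dict.mk graph) node [])[i]
      if nb == start && decide (2 ≤ p.length) then some (p ++ [nb])
      else if !(PySem.Set.contains visited nb) then
        if (p.length : Int) + 1 ≤ md then
          runB graph start md ((nb, p ++ [nb], 0, true) :: (node, p, i + 1, added) :: rest)
            (PySem.Set.add visited nb)
        else runB graph start md ((node, p, i + 1, added) :: rest) visited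
      else runB graph start md ((node, p, i + 1, added) :: rest) visited
    else runB graph start md rest (if added then PySem.Set.discard visited node else visited)
termination_by pvM graph md stack
decreasing_by
  · exact pvM_push graph md node p i added _ rest h (by assumption)
  · exact pvM_skip graph md node p i added rest h
  · exact pvM_skip graph md node p i added rest h
  · exact pvM_pop graph md (node, p, i, added) rest

def dfs_find_cycle_alt (graph : List (String × List String)) (start : String) (current : String) (path : List String) (max_depth : Int) (visited : List String) : Option (List String) :=
  if (path.length : Int) > max_depth then none
  else runB graph start max_depth [(current, path, 0, false)] (PySem.Set.ofList visited)

-- ===== PRECONDITION & SPEC =====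
def Spec_dfs_find_cycle (graph : List (String × List String)) (start : String) (current : String) (path : List String) (max_depth : Int) (visited : List String) (out : Option (List String)) : Prop := out = dfs_find_cycle_alt graph start current path max_depth visited
instance (graph : List (String × List String)) (start : String) (current : String) (path : List String) (max_depth : Int) (visited : List String) (out : Option (List String)) : Decidable (Spec_dfs_find_cycle graph start current path max_depth visited out) := by unfold Spec_dfs_find_cycle; infer_instance

-- ===== CLAIM (what is proved, stated in full; the proofs are below) =====
def Claim_equal_dfs_find_cycle : Prop := ∀ (graph : List (String × List String)) (start : String) (current : String) (path : List String) (max_depth : Int) (visited : List String), Dom_dfs_find_cycle graph start current path max_depth visited → Spec_dfs_find_cycle graph start current path max_depth visited (dfs_find_cycle graph start current path max_depth visited)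

-- ===== LEMMAS AND PROOFS =====

-- discarding a freshly added, previously absent element restores the set
lemma discard_add_of_not_mem {α : Type} [BEq α] [LawfulBEq α] (s : PySem.Set α) (x : α)
    (h : PySem.Set.contains s x = false) : PySem.Set.discard (PySem.Set.add s x) x = s := by
  have hx : x ∉ s := by simpa [PySem.Set.contains, List.contains_eq_mem] using h
  unfold PySem.Set.discard PySem.Set.add
  rw [if_neg (by simpa [PySem.Set.contains, List.contains_eq_mem] using h), List.filter_append]
  simp only [List.filter_cons, beq_self_eq_true, Bool.not_true, Bool.false_eq_true, if_false,
    List.filter_nil, List.append_nil]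
  apply List.filter_eq_self.mpr
  intro a ha
  simp only [Bool.not_eq_eq_eq_not, Bool.not_true, beq_eq_false_iff_ne]
  rintro rfl
  exact hx ha

-- MAIN CORRESPONDENCE: running B's stack machine with top frame (node, p, i, added) equals running A's
-- neighbour loop on the remaining neighbours of node, then continuing with the rest of the stack on the
-- visited set the loop leaves behind (discarding node first if this frame had added it).
lemma runB_eq_loopA (graph : List (String × List String)) (start : String) (md : Int) :
    ∀ (f : Nat) (node : String) (p : List String) (added : Bool)
      (S : List (String × List String × Nat × Bool)) (d : List String) (i : Nat)
      (v : PySem.Set String),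
      d = (PySem.Dict.getD (PySem.Dict.mk graph) node []).drop i →
      (p.length : Int) ≤ md →
      f = (md - (p.length : Int)).toNat →
      runB graph start md ((node, p, i, added) :: S) v =
        (match loopA graph start md f p d v with
         | (some r, _) => some r
         | (none, v') => runB graph start md S (if added then PySem.Set.discard v' node else v')) := by
  intro f
  induction f using Nat.strong_induction_on with
  | _ f ih =>
    intro node p added S d
    induction d with
    | nil =>
      intro i v hd hp hf
      rw [runB.eq_def]
      dsimp only
      have hlen : (PySem.Dict.getD (PySem.Dict.mk graph) node []).length ≤ i :=
        List.drop_eq_nil_iff.mp hd.symm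
      rw [dif_neg (by omega)]
      simp only [loopA]
    | cons n drest ihd =>
      intro i v hd hp hf
      have hi : i < (PySem.Dict.getD (PySem.Dict.mk graph) node []).length := by
        by_contra hc
        rw [List.drop_eq_nil_iff.mpr (by omega)] at hd
        exact List.cons_ne_nil n drest hd
      have hget : (PySem.Dict.getD (PySem.Dict.mk graph) node [])[i]'hi = n := by
        have h0 : ((PySem.Dict.getD (PySem.Dict.mk graph) node []).drop i)[0]'(by rw [← hd]; simp) = n := by
          simp [← hd]
        rw [List.getElem_drop] at h0
        simpa using h0
      have hdrest : drest = (PySem.Dict.getD (PySem.Dict.mk graph) node []).drop (i + 1) := by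
        have h1 : ((PySem.Dict.getD (PySem.Dict.mk graph) node []).drop i).drop 1 = drest := by
          rw [← hd]
          simp
        rw [List.drop_drop] at h1
        simpa [Nat.add_comm] using h1.symm
      rw [runB.eq_def]
      dsimp only
      rw [dif_pos hi]
      simp only [hget]
      rw [loopA]
      by_cases h1 : (n == start && decide (2 ≤ p.length)) = true
      · rw [if_pos h1, if_pos h1]
      · rw [if_neg h1, if_neg h1]
        by_cases h2 : PySem.Set.contains v n = true
        · simp only [h2, Bool.not_true, Bool.false_eq_true, if_false]
          exact ihd (i + 1) v hdrest hp hf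
        · simp only [Bool.not_eq_true] at h2
          simp only [h2, Bool.not_false, if_true]
          match f, hf with
          | 0, hf =>
            have hmd : ¬ ((p.length : Int) + 1 ≤ md) := by omega
            rw [if_neg hmd]
            rw [dfsA]
            dsimp only
            rw [discard_add_of_not_mem v n h2]
            exact ihd (i + 1) v hdrest hp hf
          | Nat.succ f', hf =>
            have hmd : (p.length : Int) + 1 ≤ md := by omega
            rw [if_pos hmd]
            rw [dfsA, if_neg (by simp only [List.length_append, List.length_cons, List.length_nil]; push_cast; omega)]
            have hrec := ih f' (Nat.lt_succ_self f') n (p ++ [n]) true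
              ((node, p, i + 1, added) :: S) (PySem.Dict.getD (PySem.Dict.mk graph) n []) 0
              (PySem.Set.add v n) (by simp)
              (by simp only [List.length_append, List.length_cons, List.length_nil]; push_cast; omega)
              (by simp only [List.length_append, List.length_cons, List.length_nil]; push_cast; omega)
            rw [hrec]
            rcases hA : loopA graph start md f' (p ++ [n]) (PySem.Dict.getD (PySem.Dict.mk graph) n [])
                (PySem.Set.add v n) with ⟨r?, v'⟩
            cases r? with
            | some r => rfl
            | none =>
              simp only []
              exact ihd (i + 1) (PySem.Set.discard v' n) hdrest hp hf

-- ===== VERDICT (by name: the statement is the Claim_ definition above) =====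
theorem dfs_find_cycle_spec : Claim_equal_dfs_find_cycle := by
  intro graph start current path max_depth visited _dom
  unfold Spec_dfs_find_cycle dfs_find_cycle dfs_find_cycle_alt
  by_cases hgt : (path.length : Int) > max_depth
  · rw [if_pos hgt]
    have h0 : (max_depth + 1 - (path.length : Int)).toNat = 0 := by omega
    rw [h0, dfsA]
  · rw [if_neg hgt]
    have h0 : (max_depth + 1 - (path.length : Int)).toNat
        = (max_depth - (path.length : Int)).toNat + 1 := by omega
    rw [h0, dfsA, if_neg hgt]
    rw [runB_eq_loopA graph start max_depth ((max_depth - (path.length : Int)).toNat)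
      current path false [] (PySem.Dict.getD (PySem.Dict.mk graph) current []) 0 (PySem.Set.ofList visited)
      (by simp) (by omega) rfl]
    rcases hA : loopA graph start max_depth ((max_depth - (path.length : Int)).toNat) path
        (PySem.Dict.getD (PySem.Dict.mk graph) current []) (PySem.Set.ofList visited) with ⟨r?, v'⟩
    cases r? with
    | some r => rfl
    | none => simp [runB]
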